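-- pv_equiv track=rewrite | github.com/majsterkovic/pyciphering | pyciphering/bifid.py | polybius_square_coordinates
-- ===== SOURCE A (Python) =====
-- POLYBIUS_SQUARE = [ ['A', 'B', 'C', 'D', 'E'],
--                     ['F', 'G', 'H', 'I', 'K'],
--                     ['L', 'M', 'N', 'O', 'P'],
--                     ['Q', 'R', 'S', 'T', 'U'],
--                     ['V', 'W', 'X', 'Y', 'Z'] ]
--
-- def polybius_square_coordinates(letter):
--     letter = letter.upper()
--     if letter == 'J':
--         letter = 'I'
--     for row in POLYBIUS_SQUARE:
--         for i, l in enumerate(row):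
--             if l == letter:
--                 return (POLYBIUS_SQUARE.index(row), i)
-- ===== SOURCE B (Python) =====
-- def polybius_square_coordinates(letter):
--     letter = letter.upper()
--     if letter == 'J':
--         letter = 'I'
--     if len(letter) != 1 or not ('A' <= letter <= 'Z'):
--         return None
--     idx = ord(letter) - 65
--     if letter > 'J':
--         idx -= 1
--     return divmod(idx, 5)
-- ===== Notes on version B (the rewrite author's own statement) =====
-- stated objective: idiomatic
-- what changed: Replaces the nested scan over the 5x5 grid (plus a list.index call per hit) by a closed-form arithmetic index computation with divmod, after the same upper-casing and J-to-I remap.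
-- outside the precondition, e.g. on polybius_square_coordinates('!'): A returns None, B returns None; on polybius_square_coordinates('AB'): A returns None, B returns None
import Mathlib
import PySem

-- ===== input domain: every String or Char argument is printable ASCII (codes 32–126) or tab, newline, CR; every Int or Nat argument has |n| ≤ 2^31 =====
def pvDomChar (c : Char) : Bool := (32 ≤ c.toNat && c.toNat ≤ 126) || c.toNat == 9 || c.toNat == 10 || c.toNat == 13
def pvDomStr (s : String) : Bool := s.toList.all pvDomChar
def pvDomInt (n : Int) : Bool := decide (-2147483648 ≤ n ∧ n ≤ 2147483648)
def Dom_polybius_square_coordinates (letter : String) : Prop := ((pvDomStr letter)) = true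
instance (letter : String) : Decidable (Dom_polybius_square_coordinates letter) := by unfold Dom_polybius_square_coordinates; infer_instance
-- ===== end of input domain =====

-- B replaces A's nested grid scan by a closed-form arithmetic index computation (idiomatic/O(1)).
-- Pre_ excludes inputs on which A falls through and returns None (not a pair): non-letter or multi-char input.

-- ===== PORT A =====
def pvSquare : List (List Char) :=
  [ ['A','B','C','D','E'],
    ['F','G','H','I','K'],
    ['L','M','N','O','P'],
    ['Q','R','S','T','U'],
    ['V','W','X','Y','Z'] ]

-- inner loop: for i, l in enumerate(row): if l == letter: return i
def pvInner (letter : List Char) (row : List Char) : Option Int :=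
  (PySem.List.enumerate row).findSome? (fun p => if [p.2] = letter then some p.1 else none)

def polybius_square_coordinates (letter : String) : Int × Int :=
  let l0 := PySem.Chars.upper letter.toList
  let l := if l0 = ['J'] then ['I'] else l0
  let r := pvSquare.findSome? (fun row =>
    match pvInner l row with
    | some i => some ((((PySem.List.index? pvSquare row).getD 0 : Nat) : Int), i)
    | none => none)
  r.getD (0, 0)   -- fall-through: Python returns None here; outside Pre_

-- ===== PORT B =====
def polybius_square_coordinates_alt (letter : String) : Int × Int :=
  let l0 := PySem.Chars.upper letter.toList
  let l := if l0 = ['J'] then ['I'] else l0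
  match l with
  | [c] =>
    if 'A' ≤ c ∧ c ≤ 'Z' then
      let idx : Int := (c.toNat : Int) - 65
      let idx := if 'J' < c then idx - 1 else idx
      (PySem.Int.floordiv idx 5, PySem.Int.mod idx 5)
    else (0, 0)   -- Python B returns None here; outside Pre_
  | _ => (0, 0)   -- likewise None; outside Pre_

-- ===== PRECONDITION & SPEC =====
-- Pre_ admits exactly the single ASCII letters: on all other inputs A (and B) returns None, not a pair.
def Pre_polybius_square_coordinates (letter : String) : Prop :=
  letter.toList.length = 1 ∧
    letter.toList.all (fun c => (65 ≤ c.toNat && c.toNat ≤ 90) || (97 ≤ c.toNat && c.toNat ≤ 122)) = true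
instance (letter : String) : Decidable (Pre_polybius_square_coordinates letter) := by
  unfold Pre_polybius_square_coordinates; infer_instance

def pvWitness_polybius_square_coordinates : String := "k"

def Spec_polybius_square_coordinates (letter : String) (out : Int × Int) : Prop := out = polybius_square_coordinates_alt letter
instance (letter : String) (out : Int × Int) : Decidable (Spec_polybius_square_coordinates letter out) := by unfold Spec_polybius_square_coordinates; infer_instance

-- ===== CLAIM (what is proved, stated in full; the proofs are below) =====
def Claim_equal_polybius_square_coordinates : Prop := ∀ (letter : String), Dom_polybius_square_coordinates letter → Pre_polybius_square_coordinates letter → Spec_polybius_square_coordinates letter (polybius_square_coordinates letter)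

-- ===== LEMMAS AND PROOFS =====

-- both ports depend only on letter.toList; check all letters by enumeration over Fin 123
lemma pvLetter_check : ∀ n : Fin 123,
    (65 ≤ (n : Nat) ∧ (n : Nat) ≤ 90) ∨ (97 ≤ (n : Nat) ∧ (n : Nat) ≤ 122) →
    polybius_square_coordinates (String.ofList [Char.ofNat n]) =
      polybius_square_coordinates_alt (String.ofList [Char.ofNat n]) := by
  decide

-- ===== VERDICT (by name: the statement is the Claim_ definition above) =====
theorem polybius_square_coordinates_spec : Claim_equal_polybius_square_coordinates := by
  intro letter _ hpre
  unfold Spec_polybius_square_coordinates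
  unfold Pre_polybius_square_coordinates at hpre
  obtain ⟨hlen, hall⟩ := hpre
  cases hs : letter.toList with
  | nil => rw [hs] at hlen; simp at hlen
  | cons c rest =>
    cases rest with
    | cons d t => rw [hs] at hlen; simp at hlen
    | nil =>
      have hb : (65 ≤ c.toNat ∧ c.toNat ≤ 90) ∨ (97 ≤ c.toNat ∧ c.toNat ≤ 122) := by
        rw [hs] at hall; simpa using hall
      have hlt : c.toNat < 123 := by omega
      have hletter : letter = String.ofList [c] := by
        rw [← hs]; exact Eq.symm String.ofList_toList
      rw [hletter, ← Char.ofNat_toNat c]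
      have h2 := pvLetter_check ⟨c.toNat, hlt⟩ hb
      exact h2
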